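-- pv_equiv track=rewrite | github.com/holstegelab/short_read_analyzing_pipeline_Snakemake | scripts/setup_hts.py | _parse_cflags
-- ===== SOURCE A (Python) =====
-- def _parse_cflags(tokens):
--     include_dirs = []
--     extra_compile_args = []
--     define_macros = []
--     for t in tokens:
--         if t.startswith("-I"):
--             include_dirs.append(t[2:])
--         elif t.startswith("-D"):
--             if "=" in t[2:]:
--                 k, v = t[2:].split("=", 1)
--                 define_macros.append((k, v))
--             else:
--                 define_macros.append((t[2:], None))
--         else:
--             extra_compile_args.append(t)
--     return include_dirs, extra_compile_args, define_macros
-- ===== SOURCE B (Python) =====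
-- def _macro(body):
--     if "=" in body:
--         k, v = body.split("=", 1)
--         return (k, v)
--     return (body, None)
--
--
-- def _parse_cflags(tokens):
--     include_dirs = [t[2:] for t in tokens if t.startswith("-I")]
--     extra_compile_args = [t for t in tokens
--                           if not (t.startswith("-I") or t.startswith("-D"))]
--     define_macros = [_macro(t[2:]) for t in tokens if t.startswith("-D")]
--     return include_dirs, extra_compile_args, define_macros
-- ===== Notes on version B (the rewrite author's own statement) =====
-- stated objective: simpler
-- what changed: Replaces the single three-accumulator branching loop by three independent filtered comprehensions (one per output list), with the '-D' macro parsing factored into a tiny helper.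
import Mathlib
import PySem

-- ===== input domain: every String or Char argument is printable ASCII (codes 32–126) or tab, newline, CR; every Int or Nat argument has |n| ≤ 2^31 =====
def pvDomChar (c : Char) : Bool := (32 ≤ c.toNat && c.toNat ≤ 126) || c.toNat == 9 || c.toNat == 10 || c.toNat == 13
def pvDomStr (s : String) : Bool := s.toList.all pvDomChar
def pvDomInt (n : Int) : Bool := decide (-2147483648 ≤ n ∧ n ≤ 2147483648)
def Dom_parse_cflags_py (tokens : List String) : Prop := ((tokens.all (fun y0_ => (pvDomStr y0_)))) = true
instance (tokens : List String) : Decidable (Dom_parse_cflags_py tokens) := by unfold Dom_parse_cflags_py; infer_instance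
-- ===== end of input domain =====

-- B replaces A's single three-accumulator loop by three independent filtered passes; objective: simpler.

-- ===== PORT A =====
-- one step of A's loop over tokens, on the state (include_dirs, extra_compile_args, define_macros)
def pvStepA (acc : List String × List String × List (String × Option String)) (t : String) :
    List String × List String × List (String × Option String) :=
  if PySem.Str.startswith t "-I" then
    (acc.1 ++ [PySem.Str.slice t (some 2) none], acc.2.1, acc.2.2)
  else if PySem.Str.startswith t "-D" then
    let body := PySem.Str.slice t (some 2) none
    if PySem.Str.isIn "=" body then
      match PySem.Str.splitMax? body "=" 1 with
      | some (k :: v :: _) => (acc.1, acc.2.1, acc.2.2 ++ [(k, some v)])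
      -- unreachable: split("=", 1) yields exactly two pieces when "=" is in body
      | _ => (acc.1, acc.2.1, acc.2.2 ++ [(body, none)])
    else (acc.1, acc.2.1, acc.2.2 ++ [(body, none)])
  else (acc.1, acc.2.1 ++ [t], acc.2.2)

def parse_cflags_py (tokens : List String) : List String × List String × (List (String × Option String)) :=
  tokens.foldl pvStepA ([], [], [])

-- ===== PORT B =====
def pvMacro (body : String) : String × Option String :=
  if PySem.Str.isIn "=" body then
    match PySem.Str.splitMax? body "=" 1 with
    | some (k :: v :: _) => (k, some v)
    | _ => (body, none)
  else (body, none)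

def parse_cflags_py_alt (tokens : List String) : List String × List String × (List (String × Option String)) :=
  (tokens.filterMap (fun t => if PySem.Str.startswith t "-I" then some (PySem.Str.slice t (some 2) none) else none),
   tokens.filter (fun t => !(PySem.Str.startswith t "-I" || PySem.Str.startswith t "-D")),
   tokens.filterMap (fun t => if PySem.Str.startswith t "-D" then some (pvMacro (PySem.Str.slice t (some 2) none)) else none))

-- ===== PRECONDITION & SPEC =====
def Spec_parse_cflags_py (tokens : List String) (out : List String × List String × (List (String × Option String))) : Prop := out = parse_cflags_py_alt tokens
instance (tokens : List String) (out : List String × List String × (List (String × Option String))) : Decidable (Spec_parse_cflags_py tokens out) := by unfold Spec_parse_cflags_py; infer_instance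

-- ===== CLAIM (what is proved, stated in full; the proofs are below) =====
def Claim_equal_parse_cflags_py : Prop := ∀ (tokens : List String), Dom_parse_cflags_py tokens → Spec_parse_cflags_py tokens (parse_cflags_py tokens)

-- ===== LEMMAS AND PROOFS =====

-- a token starting with "-I" does not start with "-D"
lemma pv_not_D {l : List Char} (h : PySem.Chars.startswith l ['-', 'I'] = true) :
    PySem.Chars.startswith l ['-', 'D'] = false := by
  rw [PySem.Chars.startswith_iff] at h
  rw [Bool.eq_false_iff]
  intro hD
  rw [PySem.Chars.startswith_iff] at hD
  obtain ⟨u, hu⟩ := h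
  obtain ⟨v, hv⟩ := hD
  rw [← hv] at hu
  simp at hu

-- A's "-D" branch appends exactly pvMacro of the body, whatever the split produced
lemma pvStepA_D (acc : List String × List String × List (String × Option String)) (t : String)
    (hI : PySem.Str.startswith t "-I" = false) (hD : PySem.Str.startswith t "-D" = true) :
    pvStepA acc t = (acc.1, acc.2.1, acc.2.2 ++ [pvMacro (PySem.Str.slice t (some 2) none)]) := by
  unfold pvStepA pvMacro
  rw [hI, hD]
  simp only [Bool.false_eq_true, if_false, if_true]
  split
  · split <;> rfl
  · rfl

-- loop invariant: A's fold from any state appends B's three filtered passes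
lemma foldA (ts : List String) (i e : List String) (m : List (String × Option String)) :
    ts.foldl pvStepA (i, e, m) =
      (i ++ ts.filterMap (fun t => if PySem.Str.startswith t "-I" then some (PySem.Str.slice t (some 2) none) else none),
       e ++ ts.filter (fun t => !(PySem.Str.startswith t "-I" || PySem.Str.startswith t "-D")),
       m ++ ts.filterMap (fun t => if PySem.Str.startswith t "-D" then some (pvMacro (PySem.Str.slice t (some 2) none)) else none)) := by
  induction ts generalizing i e m with
  | nil => simp
  | cons t ts ih =>
    simp only [List.foldl_cons, List.filterMap_cons, List.filter_cons]
    by_cases hI : PySem.Str.startswith t "-I" = true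
    · have hs : pvStepA (i, e, m) t = (i ++ [PySem.Str.slice t (some 2) none], e, m) := by
        unfold pvStepA; rw [hI]; rfl
      rw [hs, ih]; simp at hI; simp [hI, pv_not_D hI]
    · by_cases hD : PySem.Str.startswith t "-D" = true
      · rw [pvStepA_D _ _ (Bool.eq_false_iff.mpr hI) hD, ih]
        simp at hI hD; simp [hI, hD]
      · have hs : pvStepA (i, e, m) t = (i, e ++ [t], m) := by
          unfold pvStepA
          rw [Bool.eq_false_iff.mpr hI, Bool.eq_false_iff.mpr hD]; rfl
        rw [hs, ih]; simp at hI hD; simp [hI, hD]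

-- ===== VERDICT (by name: the statement is the Claim_ definition above) =====
theorem parse_cflags_py_spec : Claim_equal_parse_cflags_py := by
  intro tokens _
  show parse_cflags_py tokens = parse_cflags_py_alt tokens
  unfold parse_cflags_py parse_cflags_py_alt
  rw [foldA]
  simp
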